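-- pv_equiv track=rewrite | github.com/maxim79135/Course_3 | SD/Labs/Lab6/main.py | read_int_array
-- ===== SOURCE A (Python) =====
-- def read_int(string, min_value, max_value):
--     try:
--         value = int(string)
--         if min_value <= value <= max_value:
--             return value
--         return None
--     except ValueError:
--         return None
--
-- def read_int_array(s, min_value, max_value):
--     values = s.split(' ')
--     numbers = []
--     for i in values:
--         v = read_int(i, min_value, max_value)
--         if v is None:
--             return None
--         else:
--             numbers.append(v)
--     return numbers
-- ===== SOURCE B (Python) =====
-- def read_int_array(s, min_value, max_value):
--     numbers = []
--     rest = s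
--     while True:
--         i = rest.find(' ')
--         tok = rest if i < 0 else rest[:i]
--         try:
--             v = int(tok)
--         except ValueError:
--             return None
--         if not (min_value <= v <= max_value):
--             return None
--         numbers.append(v)
--         if i < 0:
--             return numbers
--         rest = rest[i + 1:]
-- ===== Notes on version B (the rewrite author's own statement) =====
-- stated objective: alternative
-- what changed: B drops split() and the read_int helper entirely: it tokenizes the string itself with an incremental find(' ')/slice scan, parsing and range-checking each token as it is carved off the remaining string.
import Mathlib
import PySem

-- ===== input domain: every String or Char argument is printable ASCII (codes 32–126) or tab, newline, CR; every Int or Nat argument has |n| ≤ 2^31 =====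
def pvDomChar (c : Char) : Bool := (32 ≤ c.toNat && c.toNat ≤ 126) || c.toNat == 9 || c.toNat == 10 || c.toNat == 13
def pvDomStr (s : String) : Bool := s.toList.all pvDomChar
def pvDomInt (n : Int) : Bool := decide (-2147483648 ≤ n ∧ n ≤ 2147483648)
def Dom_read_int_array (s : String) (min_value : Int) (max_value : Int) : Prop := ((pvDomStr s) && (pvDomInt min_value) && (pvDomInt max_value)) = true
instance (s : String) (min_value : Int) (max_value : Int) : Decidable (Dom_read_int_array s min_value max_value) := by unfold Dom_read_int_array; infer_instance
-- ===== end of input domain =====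

-- B drops split() and the read_int helper: it tokenizes the string itself with an incremental
-- find(' ')/slice scan (different decomposition, similar cost).


-- ===== PORT A =====
-- read_int: int(string), then range check; None on ValueError / out of range
-- (tokens are carried as List Char; PySem.Chars.splitOn is exact for the nonempty separator ' ')
def read_int (string : List Char) (min_value : Int) (max_value : Int) : Option Int :=
  match PySem.Int.ofChars? string with
  | none => none
  | some value => if min_value ≤ value ∧ value ≤ max_value then some value else none

-- the for-loop with early return, accumulating `numbers`
def read_int_array_loop (min_value max_value : Int) : List (List Char) → List Int → Option (List Int)
  | [], numbers => some numbers
  | i :: rest, numbers =>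
    match read_int i min_value max_value with
    | none => none
    | some v => read_int_array_loop min_value max_value rest (numbers ++ [v])

def read_int_array (s : String) (min_value : Int) (max_value : Int) : Option (List Int) :=
  read_int_array_loop min_value max_value (PySem.Chars.splitOn s.toList [' ']) []

-- ===== PORT B =====
-- termination fact for B's while-loop: after a found separator, the remaining string shrinks
theorem pvGoB_dec (rest : List Char) (h : ¬ PySem.Chars.find rest [' '] < 0) :
    (PySem.Chars.slice rest (some (PySem.Chars.find rest [' '] + 1)) none).length < rest.length := by
  have hin : ([' '] : List Char) <:+: rest := (PySem.Chars.find_nonneg_iff rest [' ']).mp (by omega)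
  have hne : rest ≠ [] := by
    intro e; subst e
    simp [List.infix_iff_prefix_suffix] at hin
  have hl : 0 < rest.length := List.length_pos_iff.mpr hne
  rw [PySem.Chars.slice_eq_listSlice, PySem.List.slice_from rest (by omega)]
  have h1 : 1 ≤ (PySem.Chars.find rest [' '] + 1).toNat := by omega
  simp only [List.length_drop]
  omega

-- B's while-loop over the remaining string `rest`, accumulating `numbers`
def pvGoB (min_value max_value : Int) (rest : List Char) (numbers : List Int) : Option (List Int) :=
  let i := PySem.Chars.find rest [' ']
  let tok := if i < 0 then rest else PySem.Chars.slice rest none (some i)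
  match PySem.Int.ofChars? tok with
  | none => none
  | some v =>
    if ¬ (min_value ≤ v ∧ v ≤ max_value) then none
    else if h : i < 0 then some (numbers ++ [v])
    else pvGoB min_value max_value (PySem.Chars.slice rest (some (i + 1)) none) (numbers ++ [v])
termination_by rest.length
decreasing_by exact pvGoB_dec rest (by assumption)

def read_int_array_alt (s : String) (min_value : Int) (max_value : Int) : Option (List Int) :=
  pvGoB min_value max_value s.toList []

-- ===== PRECONDITION & SPEC =====
def Spec_read_int_array (s : String) (min_value : Int) (max_value : Int) (out : Option (List Int)) : Prop := out = read_int_array_alt s min_value max_value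
instance (s : String) (min_value : Int) (max_value : Int) (out : Option (List Int)) : Decidable (Spec_read_int_array s min_value max_value out) := by unfold Spec_read_int_array; infer_instance

-- ===== CLAIM (what is proved, stated in full; the proofs are below) =====
def Claim_equal_read_int_array : Prop := ∀ (s : String) (min_value : Int) (max_value : Int), Dom_read_int_array s min_value max_value → Spec_read_int_array s min_value max_value (read_int_array s min_value max_value)

-- ===== LEMMAS AND PROOFS =====

-- position of the first ' ' in a char list, as an Option Nat
def pvF : List Char → Option Nat
  | [] => none
  | c :: rest => if c = ' ' then some 0 else (pvF rest).map (· + 1)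

theorem pv_find_go_eq (l : List Char) (k : Nat) :
    PySem.Chars.find.go [' '] l k =
      (match pvF l with | none => -1 | some j => ((k + j : Nat) : Int)) := by
  induction l generalizing k with
  | nil => simp [PySem.Chars.find.go, pvF]
  | cons c rest ih =>
    by_cases hc : c = ' '
    · subst hc; simp [PySem.Chars.find.go, pvF, List.isPrefixOf]
    · have hp : ([' '] : List Char).isPrefixOf (c :: rest) = false := by
        simp [List.isPrefixOf]; exact fun e => hc e.symm
      rw [PySem.Chars.find.go, hp]
      simp only [Bool.false_eq_true, if_false]
      rw [ih]
      simp only [pvF, if_neg hc]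
      cases pvF rest with
      | none => simp
      | some j => simp; ring

theorem pv_find_eq_none {cs : List Char} (h : pvF cs = none) :
    PySem.Chars.find cs [' '] = -1 := by
  have := pv_find_go_eq cs 0
  rw [PySem.Chars.find, this, h]

theorem pv_find_eq_some {cs : List Char} {j : Nat} (h : pvF cs = some j) :
    PySem.Chars.find cs [' '] = (j : Int) := by
  have := pv_find_go_eq cs 0
  rw [PySem.Chars.find, this, h]
  simp

-- the token list of a char list, split at ' '
def pvSplit : List Char → List (List Char)
  | [] => [[]]
  | c :: rest =>
    if c = ' ' then [] :: pvSplit rest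
    else match pvSplit rest with
      | [] => [[c]]
      | t :: ts => (c :: t) :: ts

theorem pvSplit_ne_nil (cs : List Char) : pvSplit cs ≠ [] := by
  cases cs with
  | nil => simp [pvSplit]
  | cons c rest =>
    simp only [pvSplit]
    split
    · simp
    · split <;> simp

theorem pv_splitOn_go_eq (fuel : Nat) (l cur : List Char) (acc : List (List Char))
    (hf : l.length < fuel) :
    PySem.Chars.splitOn.go [' '] fuel l cur acc =
      acc.reverse ++ (match pvSplit l with
        | [] => [cur.reverse]
        | t :: ts => (cur.reverse ++ t) :: ts) := by
  induction fuel generalizing l cur acc with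
  | zero => omega
  | succ fuel ih =>
    cases l with
    | nil => simp [PySem.Chars.splitOn.go, pvSplit]
    | cons c rest =>
      by_cases hc : c = ' '
      · subst hc
        have hp : ([' '] : List Char).isPrefixOf (' ' :: rest) = true := by
          simp [List.isPrefixOf]
        rw [PySem.Chars.splitOn.go]
        simp only [hp, if_true, List.length_singleton, List.drop_succ_cons, List.drop_zero]
        rw [ih rest [] (cur.reverse :: acc) (by simpa using Nat.lt_of_succ_lt_succ hf)]
        simp only [pvSplit, if_pos]
        cases h : pvSplit rest with
        | nil => exact absurd h (pvSplit_ne_nil rest)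
        | cons t ts => simp
      · have hp : ([' '] : List Char).isPrefixOf (c :: rest) = false := by
          simp [List.isPrefixOf]; exact fun e => hc e.symm
        rw [PySem.Chars.splitOn.go]
        simp only [hp, Bool.false_eq_true, if_false]
        rw [ih rest (c :: cur) acc (by simpa using Nat.lt_of_succ_lt_succ hf)]
        simp only [pvSplit, if_neg hc, List.reverse_cons]
        cases h : pvSplit rest with
        | nil => exact absurd h (pvSplit_ne_nil rest)
        | cons t ts => simp

theorem pv_splitOn_eq (cs : List Char) : PySem.Chars.splitOn cs [' '] = pvSplit cs := by
  rw [PySem.Chars.splitOn, pv_splitOn_go_eq (cs.length + 1) cs [] [] (by omega)]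
  cases h : pvSplit cs with
  | nil => exact absurd h (pvSplit_ne_nil cs)
  | cons t ts => simp

theorem pvSplit_find (cs : List Char) :
    pvSplit cs = (match pvF cs with
      | none => [cs]
      | some j => cs.take j :: pvSplit (cs.drop (j + 1))) := by
  induction cs with
  | nil => simp [pvSplit, pvF]
  | cons c rest ih =>
    by_cases hc : c = ' '
    · subst hc; simp [pvSplit, pvF]
    · simp only [pvSplit, if_neg hc, pvF]
      rw [ih]
      cases h : pvF rest with
      | none => simp
      | some j => simp

theorem pvSplit_find_none {cs : List Char} (h : pvF cs = none) : pvSplit cs = [cs] := by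
  rw [pvSplit_find, h]

theorem pvSplit_find_some {cs : List Char} {j : Nat} (h : pvF cs = some j) :
    pvSplit cs = cs.take j :: pvSplit (cs.drop (j + 1)) := by
  rw [pvSplit_find, h]

theorem pvF_ne_nil {cs : List Char} {j : Nat} (h : pvF cs = some j) : cs ≠ [] := by
  intro e; subst e; simp [pvF] at h

-- A's loop over the token list equals B's find/slice scan, any accumulator
theorem pv_loop_eq_goB (min_value max_value : Int) (n : Nat) :
    ∀ cs : List Char, cs.length ≤ n → ∀ numbers : List Int,
      read_int_array_loop min_value max_value (pvSplit cs) numbers =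
        pvGoB min_value max_value cs numbers := by
  induction n with
  | zero =>
    intro cs hlen numbers
    have hcs : cs = [] := List.length_eq_zero_iff.mp (Nat.le_zero.mp hlen)
    subst hcs
    have hF : pvF ([] : List Char) = none := rfl
    rw [pvGoB]
    simp only [pv_find_eq_none hF]
    rw [pvSplit_find_none hF]
    simp only [read_int_array_loop, read_int, show ((-1 : Int) < 0) by omega, if_true, dif_pos]
    cases PySem.Int.ofChars? ([] : List Char) with
    | none => rfl
    | some v =>
      by_cases hr : min_value ≤ v ∧ v ≤ max_value <;>
        simp [hr]
  | succ n ih =>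
    intro cs hlen numbers
    rw [pvGoB]
    cases hF : pvF cs with
    | none =>
      simp only [pv_find_eq_none hF]
      rw [pvSplit_find_none hF]
      simp only [read_int_array_loop, read_int, show ((-1 : Int) < 0) by omega, if_true, dif_pos]
      cases PySem.Int.ofChars? cs with
      | none => rfl
      | some v =>
        by_cases hr : min_value ≤ v ∧ v ≤ max_value <;>
          simp [hr]
    | some j =>
      simp only [pv_find_eq_some hF]
      have hjlt : ¬ ((j : Int) < 0) := by omega
      have htok : PySem.Chars.slice cs none (some (j : Int)) = cs.take j := by
        rw [PySem.Chars.slice_eq_listSlice, PySem.List.slice_to_natCast]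
      have hdrop : PySem.Chars.slice cs (some ((j : Int) + 1)) none = cs.drop (j + 1) := by
        rw [PySem.Chars.slice_eq_listSlice]
        have he : ((j : Int) + 1) = ((j + 1 : Nat) : Int) := by omega
        rw [he, PySem.List.slice_from_natCast]
      simp only [if_neg hjlt, dif_neg hjlt, htok, hdrop]
      rw [pvSplit_find_some hF]
      simp only [read_int_array_loop, read_int]
      cases PySem.Int.ofChars? (cs.take j) with
      | none => rfl
      | some v =>
        have hne : cs ≠ [] := pvF_ne_nil hF
        have hlen' : (cs.drop (j + 1)).length ≤ n := by
          have hpos : 0 < cs.length := List.length_pos_iff.mpr hne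
          simp only [List.length_drop]; omega
        by_cases hr : min_value ≤ v ∧ v ≤ max_value
        · simp only [if_pos hr, if_neg (not_not_intro hr)]
          exact ih (cs.drop (j + 1)) hlen' (numbers ++ [v])
        · simp [hr]

-- ===== VERDICT (by name: the statement is the Claim_ definition above) =====
theorem read_int_array_spec : Claim_equal_read_int_array := by
  intro s min_value max_value _
  unfold Spec_read_int_array read_int_array read_int_array_alt
  rw [pv_splitOn_eq]
  exact pv_loop_eq_goB min_value max_value s.toList.length s.toList le_rfl []
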